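-- pv_equiv track=rewrite | github.com/Carolineup/RA-OC | data_generation.py | reorder_data
-- ===== SOURCE A (Python) =====
-- def reorder_data(R_i):
--     R_i_reorder = [0] * len(R_i)
--     rank_list = sorted(R_i) # [1,2,3...]
--     rank_list = [i for i in rank_list if i !=0]
--     for j,rank in enumerate(R_i):
--         if rank !=0:
--             rank_index = rank_list.index(rank)
--             R_i_reorder[j] = rank_index+1
--     return R_i_reorder
-- ===== SOURCE B (Python) =====
-- def reorder_data(R_i):
--     # rank of a nonzero x = 1 + number of nonzero entries strictly smaller than x
--     # (no sorting and no positional lookup: a direct order-statistic count)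
--     return [0 if x == 0 else 1 + sum(1 for y in R_i if y != 0 and y < x) for x in R_i]
-- ===== Notes on version B (the rewrite author's own statement) =====
-- stated objective: simpler
-- what changed: Drops the sort and the positional .index lookup entirely: the rank of a nonzero x is computed directly as 1 plus the count of nonzero entries strictly smaller than x.
import Mathlib
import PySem

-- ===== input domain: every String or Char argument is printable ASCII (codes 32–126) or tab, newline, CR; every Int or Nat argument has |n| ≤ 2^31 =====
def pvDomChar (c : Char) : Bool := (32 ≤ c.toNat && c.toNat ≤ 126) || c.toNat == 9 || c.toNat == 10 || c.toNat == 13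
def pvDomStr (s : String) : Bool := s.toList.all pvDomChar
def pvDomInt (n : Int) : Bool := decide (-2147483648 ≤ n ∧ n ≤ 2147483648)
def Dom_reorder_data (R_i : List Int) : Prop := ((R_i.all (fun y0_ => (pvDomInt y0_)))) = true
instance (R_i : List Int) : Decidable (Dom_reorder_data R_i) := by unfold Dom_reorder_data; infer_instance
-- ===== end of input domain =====

-- B drops A's sort and positional .index lookup: the rank of a nonzero x is computed
-- directly as 1 + count of nonzero entries strictly smaller than x (simpler, same cost).

-- ===== PORT A =====
-- literal port of Source A: [0]*len, sorted, filter, then the enumerate loop with .index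
def reorder_data (R_i : List Int) : List Int :=
  let R_i_reorder : List Int := List.replicate R_i.length 0
  let rank_list := (PySem.List.sorted R_i (fun x => x) false).filter (fun i => decide (i ≠ 0))
  (PySem.List.enumerate R_i 0).foldl
    (fun (acc : List Int) (jr : Int × Int) =>
      if jr.2 ≠ 0 then
        match PySem.List.index? rank_list jr.2 with
        | some rank_index => PySem.List.pySetD acc jr.1 ((rank_index : Int) + 1)
        | none => acc  -- unreachable: a nonzero rank of R_i is always in rank_list
      else acc)
    R_i_reorder

-- ===== PORT B =====
-- literal port of Source B: per-element 0/1-sum over R_i (ported as List.countP, cf. PYSEM sum_map_ite_one_zero)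
def reorder_data_alt (R_i : List Int) : List Int :=
  R_i.map (fun x => if x = 0 then 0 else 1 + (R_i.countP (fun y => decide (y ≠ 0 ∧ y < x)) : Int))

-- ===== PRECONDITION & SPEC =====
def Spec_reorder_data (R_i : List Int) (out : List Int) : Prop := out = reorder_data_alt R_i
instance (R_i : List Int) (out : List Int) : Decidable (Spec_reorder_data R_i out) := by unfold Spec_reorder_data; infer_instance

-- ===== CLAIM (what is proved, stated in full; the proofs are below) =====
def Claim_equal_reorder_data : Prop := ∀ (R_i : List Int), Dom_reorder_data R_i → Spec_reorder_data R_i (reorder_data R_i)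

-- ===== LEMMAS AND PROOFS =====

/-- A's pointwise value: first index of x in rl plus one; 0 for x = 0 or x missing -/
def pvRank (rl : List Int) (x : Int) : Int :=
  if x ≠ 0 then
    match PySem.List.index? rl x with
    | some k => (k : Int) + 1
    | none => 0
  else 0

/-- A's enumerate/pySetD loop, characterised position by position -/
theorem pvFoldA (rl : List Int) : ∀ (xs : List Int) (s : Nat) (acc : List Int),
    (∀ k, k < xs.length → acc[s + k]? = some 0) →
    ∀ j : Nat,
      ((PySem.List.enumerate xs (s : Int)).foldl
        (fun (acc : List Int) (jr : Int × Int) =>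
          if jr.2 ≠ 0 then
            match PySem.List.index? rl jr.2 with
            | some rank_index => PySem.List.pySetD acc jr.1 ((rank_index : Int) + 1)
            | none => acc
          else acc) acc)[j]? =
      if s ≤ j ∧ j < s + xs.length then xs[j - s]?.map (pvRank rl) else acc[j]? := by
  intro xs
  induction xs with
  | nil =>
    intro s acc _ j
    rw [PySem.List.enumerate_nil]
    simp only [List.foldl_nil, List.length_nil]
    rw [if_neg (by omega)]
  | cons x t ih =>
    intro s acc hacc j
    rw [PySem.List.enumerate_cons, List.foldl_cons]
    have h0 : acc[s]? = some 0 := by simpa using hacc 0 (by simp)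
    have hs : s < acc.length := by
      obtain ⟨h, _⟩ := List.getElem?_eq_some_iff.mp h0; exact h
    set acc' := (fun (acc : List Int) (jr : Int × Int) =>
          if jr.2 ≠ 0 then
            match PySem.List.index? rl jr.2 with
            | some rank_index => PySem.List.pySetD acc jr.1 ((rank_index : Int) + 1)
            | none => acc
          else acc) acc ((s : Int), x) with hacc'
    have hget : ∀ m : Nat, acc'[m]? = if m = s then some (pvRank rl x) else acc[m]? := by
      intro m
      by_cases hx : x ≠ 0
      · cases hix : PySem.List.index? rl x with
        | some k =>
          have e : acc' = acc.set s ((k : Int) + 1) := by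
            rw [hacc']; show (if x ≠ 0 then _ else acc) = _
            rw [if_pos hx, hix]
            exact PySem.List.pySetD_natCast acc s ((k : Int) + 1)
          rw [e, List.getElem?_set]
          by_cases hm : m = s
          · subst hm
            rw [if_pos rfl, if_pos rfl, if_pos hs]
            simp only [pvRank]; rw [if_pos hx, hix]
          · rw [if_neg (fun h => hm h.symm), if_neg hm]
        | none =>
          have e : acc' = acc := by
            rw [hacc']; show (if x ≠ 0 then _ else acc) = _
            rw [if_pos hx, hix]
          rw [e]
          by_cases hm : m = s
          · subst hm
            rw [if_pos rfl, h0]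
            simp only [pvRank]; rw [if_pos hx, hix]
          · rw [if_neg hm]
      · have e : acc' = acc := by
          rw [hacc']; show (if x ≠ 0 then _ else acc) = _
          rw [if_neg hx]
        rw [e]
        by_cases hm : m = s
        · subst hm
          rw [if_pos rfl, h0]
          simp only [pvRank]; rw [if_neg hx]
        · rw [if_neg hm]
    have hcast : ((s : Int) + 1) = ((s + 1 : Nat) : Int) := by push_cast; ring
    rw [hcast, ih (s + 1) acc' (by
      intro k hk
      have h' : s + 1 + k = s + (k + 1) := by omega
      rw [h', hget, if_neg (by omega)]
      exact hacc (k + 1) (by simp only [List.length_cons]; omega))]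
    by_cases hj : j = s
    · subst hj
      rw [if_neg (by omega), hget, if_pos rfl,
          if_pos ⟨Nat.le_refl _, by simp only [List.length_cons]; omega⟩]
      simp
    · rw [hget, if_neg hj]
      by_cases hin : s + 1 ≤ j ∧ j < s + 1 + t.length
      · rw [if_pos hin, if_pos (by simp only [List.length_cons]; omega)]
        have h1 : j - s = (j - (s + 1)) + 1 := by omega
        rw [h1, List.getElem?_cons_succ]
      · rw [if_neg hin, if_neg (by simp only [List.length_cons]; omega)]

theorem pvA_eq_map (R_i : List Int) :
    reorder_data R_i
      = R_i.map (pvRank ((PySem.List.sorted R_i (fun x => x) false).filter (fun i => decide (i ≠ 0)))) := by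
  unfold reorder_data
  apply List.ext_getElem?
  intro j
  have h := pvFoldA ((PySem.List.sorted R_i (fun x => x) false).filter (fun i => decide (i ≠ 0)))
    R_i 0 (List.replicate R_i.length 0) (by intro k hk; simp [hk]) j
  rw [show ((0 : Nat) : Int) = (0 : Int) from rfl] at h
  rw [h]
  by_cases hin : j < R_i.length
  · rw [if_pos ⟨Nat.zero_le _, by omega⟩, List.getElem?_map, Nat.sub_zero]
  · rw [if_neg (by omega)]
    rw [List.getElem?_eq_none (by simpa using hin), List.getElem?_eq_none (by simpa using hin)]

/-- in a ≤-sorted list, the first index of a member equals the number of strictly smaller elements -/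
theorem pvIndexSorted (x : Int) : ∀ (s : List Int), s.Pairwise (· ≤ ·) → x ∈ s →
    PySem.List.index? s x = some (s.countP (fun y => decide (y < x))) := by
  intro s
  induction s with
  | nil => intro _ h; cases h
  | cons a t ih =>
    intro hp hx
    have hle : ∀ y ∈ t, a ≤ y := (List.pairwise_cons.mp hp).1
    by_cases hax : a = x
    · subst hax
      have h0 : t.countP (fun y => decide (y < a)) = 0 := by
        rw [List.countP_eq_zero]
        intro y hy
        simpa using not_lt.mpr (hle y hy)
      rw [PySem.List.index?_eq_idxOf?] at *
      rw [show List.idxOf? a (a :: t) = some 0 from by simpa using PySem.List.index?_cons_self a t]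
      rw [List.countP_cons, h0]
      simp
    · have hxt : x ∈ t := by cases hx with
        | head => exact absurd rfl hax
        | tail _ h => exact h
      rw [PySem.List.index?_cons_of_ne _ hax, ih ((List.pairwise_cons.mp hp).2) hxt]
      have hax' : a < x := lt_of_le_of_ne (hle x hxt) hax
      rw [List.countP_cons]
      simp [hax']

theorem pvRank_eq_count (R_i : List Int) (x : Int) (hx : x ∈ R_i) :
    pvRank ((PySem.List.sorted R_i (fun x => x) false).filter (fun i => decide (i ≠ 0))) x
      = if x = 0 then 0 else 1 + (R_i.countP (fun y => decide (y ≠ 0 ∧ y < x)) : Int) := by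
  by_cases hx0 : x = 0
  · simp [pvRank, hx0]
  · set rl := (PySem.List.sorted R_i (fun x => x) false).filter (fun i => decide (i ≠ 0)) with hrl
    have hmem : x ∈ rl := by
      rw [hrl, List.mem_filter]
      exact ⟨(PySem.List.mem_sorted _ _ _ _).mpr hx, by simpa using hx0⟩
    have hpw : rl.Pairwise (· ≤ ·) :=
      List.Pairwise.filter _ (PySem.List.sorted_pairwise R_i (fun x => x))
    have hidx := pvIndexSorted x rl hpw hmem
    have hcount : rl.countP (fun y => decide (y < x))
        = R_i.countP (fun y => decide (y ≠ 0 ∧ y < x)) := by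
      rw [hrl, List.countP_filter]
      rw [(PySem.List.sorted_perm R_i (fun x => x) false).countP_eq]
      apply List.countP_congr
      intro y _
      simp [and_comm]
    simp only [pvRank, hidx]
    rw [if_pos (by simpa using hx0), if_neg hx0, hcount]
    ring

-- ===== VERDICT (by name: the statement is the Claim_ definition above) =====
theorem reorder_data_spec : Claim_equal_reorder_data := by
  intro R_i _
  unfold Spec_reorder_data reorder_data_alt
  rw [pvA_eq_map]
  apply List.map_congr_left
  intro x hx
  exact pvRank_eq_count R_i x hx
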